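-- pv_equiv track=rewrite | github.com/LLUDA/icc-analysis | icc_hunter_v2.py | get_major_swings
-- ===== SOURCE A (Python) =====
-- def get_major_swings(highs, lows, lookback=5):
--     """Find major swing highs and lows"""
--     swings_high = []
--     swings_low = []
--
--     for i in range(lookback, len(highs) - lookback):
--         if highs[i] == max(highs[i - lookback : i + lookback + 1]):
--             swings_high.append((i, highs[i]))
--         if lows[i] == min(lows[i - lookback : i + lookback + 1]):
--             swings_low.append((i, lows[i]))
--
--     return swings_high, swings_low
-- ===== SOURCE B (Python) =====
-- def _prev_dom(arr, beats):
--     # prev[i] = largest j < i with beats(arr[j], arr[i]), else -1  (monotonic stack, O(n))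
--     prev = []
--     stack = []
--     for i in range(len(arr)):
--         while stack and not beats(arr[stack[-1]], arr[i]):
--             stack.pop()
--         prev.append(stack[-1] if stack else -1)
--         stack.append(i)
--     return prev
--
--
-- def _next_dom(arr, beats):
--     # next[i] = smallest j > i with beats(arr[j], arr[i]), else len(arr)
--     n = len(arr)
--     rev = _prev_dom(arr[::-1], beats)
--     return [n - 1 - rev[n - 1 - i] if rev[n - 1 - i] >= 0 else n for i in range(n)]
--
--
-- def get_major_swings(highs, lows, lookback=5):
--     """Find major swing highs and lows"""
--     gt = lambda a, b: a > b
--     lt = lambda a, b: a < b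
--     prev_g = _prev_dom(highs, gt)
--     next_g = _next_dom(highs, gt)
--     prev_s = _prev_dom(lows, lt)
--     next_s = _next_dom(lows, lt)
--     swings_high = []
--     swings_low = []
--     for i in range(lookback, len(highs) - lookback):
--         if i - prev_g[i] > lookback and next_g[i] - i > lookback:
--             swings_high.append((i, highs[i]))
--         if i - prev_s[i] > lookback and next_s[i] - i > lookback:
--             swings_low.append((i, lows[i]))
--     return swings_high, swings_low
-- ===== Notes on version B (the rewrite author's own statement) =====
-- stated objective: alternative
-- what changed: Replaces the per-index slice+max/min scan with monotonic-stack precomputation of the nearest strictly-greater/smaller neighbour on each side, then a symmetric distance test per index (O(n) passes instead of O(n*lookback), though not measurably faster in CPython where A's slicing runs at C speed); Pre_ excludes inputs where lows is shorter than highs while the scan is nonempty, a mismatched-parallel-series shape on which A's low window is silently truncated by slicing and either behaviour is defensible (it also excludes negative lookback and too-short lows, where A raises).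
-- outside the precondition, e.g. on get_major_swings([0, 1, 0], [5, 0], 1): A returns ([(1, 1)], [(1, 0)]), B returns ([(1, 1)], [])
import Mathlib
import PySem

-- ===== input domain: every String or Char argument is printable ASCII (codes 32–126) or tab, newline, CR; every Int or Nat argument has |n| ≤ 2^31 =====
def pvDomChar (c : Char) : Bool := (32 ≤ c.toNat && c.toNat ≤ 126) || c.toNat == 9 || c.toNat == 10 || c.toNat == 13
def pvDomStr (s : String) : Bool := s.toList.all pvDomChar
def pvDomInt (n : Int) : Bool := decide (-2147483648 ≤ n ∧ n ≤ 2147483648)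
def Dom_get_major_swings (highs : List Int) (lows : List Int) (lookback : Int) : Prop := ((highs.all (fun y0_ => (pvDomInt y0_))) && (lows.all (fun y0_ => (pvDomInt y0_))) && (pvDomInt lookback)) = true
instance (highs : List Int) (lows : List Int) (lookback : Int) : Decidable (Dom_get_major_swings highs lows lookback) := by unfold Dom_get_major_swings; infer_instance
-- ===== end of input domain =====

-- B replaces A's per-index slice max/min scan with monotonic-stack nearest-dominating-neighbour precomputation and a symmetric distance test (alternative algorithm).


-- ===== PORT A =====
-- literal transliteration of A: for each i in range(lookback, len(highs)-lookback),
-- compare highs[i] / lows[i] with max/min of the +-lookback slice.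
-- (.getD 0 on pyGet?/max?/min? only fires where Python would raise, which Pre_ excludes)
def get_major_swings (highs : List Int) (lows : List Int) (lookback : Int) : (List (Int × Int)) × (List (Int × Int)) :=
  (PySem.List.pyRange lookback ((highs.length : Int) - lookback) 1).foldl
    (fun st i =>
      let hv := (PySem.List.pyGet? highs i).getD 0
      let st1 :=
        if hv = (PySem.List.max? (PySem.List.slice highs (some (i - lookback)) (some (i + lookback + 1))) (fun x => x)).getD 0
        then (st.1 ++ [(i, hv)], st.2) else st
      let lv := (PySem.List.pyGet? lows i).getD 0
      if lv = (PySem.List.min? (PySem.List.slice lows (some (i - lookback)) (some (i + lookback + 1))) (fun x => x)).getD 0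
      then (st1.1, st1.2 ++ [(i, lv)]) else st1)
    ([], [])

-- ===== PORT B =====
-- Source B helper: the inner `while stack and not beats(arr[stack[-1]], arr[i]): stack.pop()`
-- (stack top at the head; indices stored in the stack are always valid positions, so getD is exact)
def pvPop (arr : List Int) (beats : Int → Int → Bool) (v : Int) : List Nat → List Nat
  | [] => []
  | k :: s => if beats (arr.getD k 0) v then k :: s else pvPop arr beats v s

-- Source B helper _prev_dom: one left-to-right pass carrying (prev-list, stack)
def pvPrevDom (arr : List Int) (beats : Int → Int → Bool) : List Int :=
  ((List.range arr.length).foldl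
    (fun (st : List Int × List Nat) i =>
      let s := pvPop arr beats (arr.getD i 0) st.2
      (st.1 ++ [match s.head? with | some k => (k : Int) | none => -1], i :: s))
    ([], [])).1

-- Source B helper _next_dom: _prev_dom on the reversed list, indices mapped back
def pvNextDom (arr : List Int) (beats : Int → Int → Bool) : List Int :=
  let n := arr.length
  let rev := pvPrevDom arr.reverse beats
  (List.range n).map (fun i =>
    let p := rev.getD (n - 1 - i) 0
    if 0 ≤ p then (n : Int) - 1 - p else (n : Int))

-- literal transliteration of B (Source B): nearest strictly-greater/smaller neighbour indices,
-- then one symmetric distance test per index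
def get_major_swings_alt (highs : List Int) (lows : List Int) (lookback : Int) : (List (Int × Int)) × (List (Int × Int)) :=
  let prevG := pvPrevDom highs (fun a b => a > b)
  let nextG := pvNextDom highs (fun a b => a > b)
  let prevS := pvPrevDom lows (fun a b => a < b)
  let nextS := pvNextDom lows (fun a b => a < b)
  (PySem.List.pyRange lookback ((highs.length : Int) - lookback) 1).foldl
    (fun st i =>
      let st1 :=
        if i - PySem.List.pyGetD prevG i 0 > lookback ∧ PySem.List.pyGetD nextG i 0 - i > lookback
        then (st.1 ++ [(i, (PySem.List.pyGet? highs i).getD 0)], st.2) else st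
      if i - PySem.List.pyGetD prevS i 0 > lookback ∧ PySem.List.pyGetD nextS i 0 - i > lookback
      then (st1.1, st1.2 ++ [(i, (PySem.List.pyGet? lows i).getD 0)]) else st1)
    ([], [])

-- ===== PRECONDITION & SPEC =====
-- Pre_ excludes: negative lookback and lows shorter than len(highs)-lookback, where A raises
-- (empty-slice ValueError / IndexError); and — while A still returns there — lows with
-- len(highs)-lookback <= len(lows) < len(highs) and a nonempty scan: a mismatched parallel-series
-- shape on which A's low window is silently truncated by slicing and either behaviour is defensible.
def Pre_get_major_swings (highs : List Int) (lows : List Int) (lookback : Int) : Prop :=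
  0 ≤ lookback ∧
  ((highs.length : Int) - lookback ≤ lookback ∨ (highs.length : Int) ≤ (lows.length : Int))
instance (highs : List Int) (lows : List Int) (lookback : Int) : Decidable (Pre_get_major_swings highs lows lookback) := by unfold Pre_get_major_swings; infer_instance

def pvWitness_get_major_swings : List Int × List Int × Int := ([1, 2, 3, 0, 5, 6], [9, 2, 3, 4, 1, 1], 1)

def Spec_get_major_swings (highs : List Int) (lows : List Int) (lookback : Int) (out : (List (Int × Int)) × (List (Int × Int))) : Prop := out = get_major_swings_alt highs lows lookback
instance (highs : List Int) (lows : List Int) (lookback : Int) (out : (List (Int × Int)) × (List (Int × Int))) : Decidable (Spec_get_major_swings highs lows lookback out) := by unfold Spec_get_major_swings; infer_instance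

-- ===== CLAIM (what is proved, stated in full; the proofs are below) =====
def Claim_equal_get_major_swings : Prop := ∀ (highs : List Int) (lows : List Int) (lookback : Int), Dom_get_major_swings highs lows lookback → Pre_get_major_swings highs lows lookback → Spec_get_major_swings highs lows lookback (get_major_swings highs lows lookback)

-- ===== LEMMAS AND PROOFS =====

-- `beats` instantiations (> and <) satisfy: transitivity, and `beats a c → ¬ beats b c → beats a b`
def pvTrans (beats : Int → Int → Bool) : Prop :=
  ∀ a b c : Int, beats a b = true → beats b c = true → beats a c = true

def pvMono (beats : Int → Int → Bool) : Prop :=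
  ∀ a b c : Int, beats a c = true → beats b c = false → beats a b = true

-- abstract description of the stack: indices j < e that strictly dominate everything after them
def pvBeatsAll (arr : List Int) (beats : Int → Int → Bool) (j e : Nat) : Bool :=
  decide (∀ k, k < e → j < k → beats (arr.getD j 0) (arr.getD k 0) = true)

def pvGStack (arr : List Int) (beats : Int → Int → Bool) (e : Nat) : List Nat :=
  ((List.range e).filter (fun j => pvBeatsAll arr beats j e)).reverse

def pvResVal (arr : List Int) (beats : Int → Int → Bool) (e : Nat) : Int :=
  match ((pvGStack arr beats e).filter (fun j => beats (arr.getD j 0) (arr.getD e 0))).head? with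
  | some k => (k : Int)
  | none => -1

lemma pvPop_eq_dropWhile (arr : List Int) (beats : Int → Int → Bool) (v : Int) (l : List Nat) :
    pvPop arr beats v l = l.dropWhile (fun k => !beats (arr.getD k 0) v) := by
  induction l with
  | nil => rfl
  | cons k s ih =>
      cases h : beats (arr.getD k 0) v <;>
        simp only [pvPop, List.dropWhile_cons, h, Bool.not_true, Bool.not_false] <;>
        simp [ih]

lemma pvDropWhile_eq_filter {α : Type} (p : α → Bool) (l : List α)
    (h : l.Pairwise (fun a b => p a = true → p b = true)) :
    l.dropWhile (fun x => !p x) = l.filter p := by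
  induction l with
  | nil => rfl
  | cons x t ih =>
      rcases List.pairwise_cons.mp h with ⟨hx, ht⟩
      by_cases hp : p x = true
      · have : t.filter p = t := List.filter_eq_self.mpr (fun b hb => hx b hb hp)
        simp [hp, this]
      · simp only [Bool.not_eq_true] at hp
        simp [hp, ih ht]

lemma pvMem_gstack (arr : List Int) (beats : Int → Int → Bool) (e j : Nat) :
    j ∈ pvGStack arr beats e ↔ j < e ∧ pvBeatsAll arr beats j e = true := by
  simp [pvGStack, List.mem_filter, List.mem_range]

lemma pvGStack_pairwise_gt (arr : List Int) (beats : Int → Int → Bool) (e : Nat) :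
    (pvGStack arr beats e).Pairwise (fun a b => b < a) := by
  unfold pvGStack
  rw [List.pairwise_reverse]
  exact (List.pairwise_lt_range).filter _

lemma pvGStack_pairwise_chain (arr : List Int) (beats : Int → Int → Bool)
    (htr : pvTrans beats) (e : Nat) (v : Int) :
    (pvGStack arr beats e).Pairwise
      (fun a b => beats (arr.getD a 0) v = true → beats (arr.getD b 0) v = true) := by
  refine (pvGStack_pairwise_gt arr beats e).imp_of_mem ?_
  intro a b ha hb hlt hav
  rcases (pvMem_gstack arr beats e a).mp ha with ⟨hae, _⟩
  rcases (pvMem_gstack arr beats e b).mp hb with ⟨hbe, hball⟩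
  have hba : beats (arr.getD b 0) (arr.getD a 0) = true := by
    have := of_decide_eq_true hball
    exact this a hae hlt
  exact htr _ _ _ hba hav

lemma pvBeatsAll_succ (arr : List Int) (beats : Int → Int → Bool) (j e : Nat) (hj : j < e) :
    pvBeatsAll arr beats j (e + 1)
      = (pvBeatsAll arr beats j e && beats (arr.getD j 0) (arr.getD e 0)) := by
  rcases h : beats (arr.getD j 0) (arr.getD e 0) with _ | _
  · simp only [Bool.and_false]
    apply decide_eq_false
    intro hall
    have := hall e (by omega) hj
    rw [this] at h
    cases h
  · simp only [Bool.and_true]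
    rcases h2 : pvBeatsAll arr beats j e with _ | _
    · apply decide_eq_false
      intro hall
      have := of_decide_eq_false h2
      exact this (fun k hk hjk => hall k (by omega) hjk)
    · apply decide_eq_true
      intro k hk hjk
      by_cases hke : k = e
      · subst hke; exact h
      · exact of_decide_eq_true h2 k (by omega) hjk

lemma pvGStack_succ (arr : List Int) (beats : Int → Int → Bool) (e : Nat) :
    pvGStack arr beats (e + 1)
      = e :: (pvGStack arr beats e).filter (fun j => beats (arr.getD j 0) (arr.getD e 0)) := by
  unfold pvGStack
  rw [List.range_succ, List.filter_append]
  have he : pvBeatsAll arr beats e (e + 1) = true := by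
    apply decide_eq_true; intro k hk hek; omega
  have hcong : (List.range e).filter (fun j => pvBeatsAll arr beats j (e + 1))
      = (List.range e).filter
          (fun j => pvBeatsAll arr beats j e && beats (arr.getD j 0) (arr.getD e 0)) := by
    apply List.filter_congr
    intro j hj
    exact pvBeatsAll_succ arr beats j e (List.mem_range.mp hj)
  rw [hcong]
  have : (List.range e).filter
        (fun j => pvBeatsAll arr beats j e && beats (arr.getD j 0) (arr.getD e 0))
      = ((List.range e).filter (fun j => pvBeatsAll arr beats j e)).filter
          (fun j => beats (arr.getD j 0) (arr.getD e 0)) := by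
    rw [List.filter_filter]
    apply List.filter_congr
    intro j _
    rw [Bool.and_comm]
  rw [this]
  simp [he, List.filter_reverse]

-- loop invariant of Source B's _prev_dom pass
lemma pvPrevDom_fold (arr : List Int) (beats : Int → Int → Bool) (htr : pvTrans beats) (e : Nat) :
    (List.range e).foldl
      (fun (st : List Int × List Nat) i =>
        let s := pvPop arr beats (arr.getD i 0) st.2
        (st.1 ++ [match s.head? with | some k => (k : Int) | none => -1], i :: s))
      ([], [])
    = ((List.range e).map (pvResVal arr beats), pvGStack arr beats e) := by
  induction e with
  | zero => simp [pvGStack]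
  | succ e ih =>
      rw [List.range_succ, List.foldl_append, ih, List.map_append]
      simp only [List.foldl_cons, List.foldl_nil]
      have hpop : pvPop arr beats (arr.getD e 0) (pvGStack arr beats e)
          = (pvGStack arr beats e).filter (fun j => beats (arr.getD j 0) (arr.getD e 0)) := by
        rw [pvPop_eq_dropWhile]
        exact pvDropWhile_eq_filter _ _ (pvGStack_pairwise_chain arr beats htr e _)
      simp only [List.map_cons, List.map_nil]
      rw [pvGStack_succ]
      unfold pvResVal
      rw [← hpop]

lemma pvPrevDom_eq_map (arr : List Int) (beats : Int → Int → Bool) (htr : pvTrans beats) :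
    pvPrevDom arr beats = (List.range arr.length).map (pvResVal arr beats) := by
  unfold pvPrevDom
  rw [pvPrevDom_fold arr beats htr]

lemma pvNeg_one_le_resVal (arr : List Int) (beats : Int → Int → Bool) (e : Nat) :
    -1 ≤ pvResVal arr beats e := by
  unfold pvResVal
  cases h : ((pvGStack arr beats e).filter (fun j => beats (arr.getD j 0) (arr.getD e 0))).head? with
  | none => exact le_rfl
  | some k => show (-1 : Int) ≤ (k : Int); omega

-- every index that beats e has a stack survivor at or above it
lemma pvKey (arr : List Int) (beats : Int → Int → Bool) (hm : pvMono beats) (e : Nat) :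
    ∀ j, j < e → beats (arr.getD j 0) (arr.getD e 0) = true →
      ∃ j' ∈ (pvGStack arr beats e).filter (fun j => beats (arr.getD j 0) (arr.getD e 0)),
        j ≤ j' := by
  intro j
  induction hfuel : e - j using Nat.strong_induction_on generalizing j with
  | _ fuel ih =>
    intro hje hbeat
    rcases h : pvBeatsAll arr beats j e with _ | _
    · have := of_decide_eq_false h
      push_neg at this
      rcases this with ⟨k, hk, hjk, hkbad⟩
      have hkbeat : beats (arr.getD k 0) (arr.getD e 0) = true := by
        rcases hkb : beats (arr.getD k 0) (arr.getD e 0) with _ | _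
        · exact absurd (hm _ _ _ hbeat hkb) hkbad
        · rfl
      rcases ih (e - k) (by omega) k rfl hk hkbeat with ⟨j', hj', hkj'⟩
      exact ⟨j', hj', by omega⟩
    · refine ⟨j, ?_, le_refl j⟩
      rw [List.mem_filter]
      exact ⟨(pvMem_gstack arr beats e j).mpr ⟨hje, h⟩, hbeat⟩

lemma pvResVal_lt_iff (arr : List Int) (beats : Int → Int → Bool)
    (hm : pvMono beats) (e t : Nat) (_ht : t ≤ e) :
    pvResVal arr beats e < (t : Int)
      ↔ ∀ j, t ≤ j → j < e → beats (arr.getD j 0) (arr.getD e 0) = false := by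
  have hpw : ((pvGStack arr beats e).filter
        (fun j => beats (arr.getD j 0) (arr.getD e 0))).Pairwise (fun a b => b < a) :=
    (pvGStack_pairwise_gt arr beats e).filter _
  constructor
  · intro hlt j htj hje
    rcases hb : beats (arr.getD j 0) (arr.getD e 0) with _ | _
    · rfl
    · exfalso
      rcases pvKey arr beats hm e j hje hb with ⟨j', hj', hjj'⟩
      unfold pvResVal at hlt
      rcases hhead : ((pvGStack arr beats e).filter
          (fun j => beats (arr.getD j 0) (arr.getD e 0))).head? with _ | h0
      · rw [List.head?_eq_none_iff] at hhead
        rw [hhead] at hj'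
        exact absurd hj' (List.not_mem_nil)
      · rw [hhead] at hlt
        have hlt' : ((h0 : Nat) : Int) < (t : Int) := hlt
        rcases List.head?_eq_some_iff.mp hhead with ⟨rest, hrest⟩
        rw [hrest] at hj' hpw
        rcases List.mem_cons.mp hj' with h | h
        · subst h; omega
        · have := (List.pairwise_cons.mp hpw).1 j' h
          omega
  · intro hall
    unfold pvResVal
    rcases hhead : ((pvGStack arr beats e).filter
        (fun j => beats (arr.getD j 0) (arr.getD e 0))).head? with _ | h0
    · simpa using (by omega : (-1 : Int) < (t : Int))
    · have hmem : h0 ∈ (pvGStack arr beats e).filter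
          (fun j => beats (arr.getD j 0) (arr.getD e 0)) := List.mem_of_mem_head? (by rw [hhead]; rfl)
      rw [List.mem_filter] at hmem
      rcases (pvMem_gstack arr beats e h0).mp hmem.1 with ⟨h0e, _⟩
      by_contra hge
      push_neg at hge
      have h0t : t ≤ h0 := by exact_mod_cast hge
      have hbad := hmem.2
      rw [hall h0 h0t h0e] at hbad
      cases hbad

lemma pvPrevDom_getD (arr : List Int) (beats : Int → Int → Bool) (htr : pvTrans beats)
    (i : Nat) (hi : i < arr.length) :
    (pvPrevDom arr beats).getD i 0 = pvResVal arr beats i := by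
  rw [pvPrevDom_eq_map arr beats htr]
  rw [List.getD_eq_getElem?_getD, List.getElem?_map, List.getElem?_range hi]
  rfl

lemma pvGetD_reverse (arr : List Int) (j : Nat) (hj : j < arr.length) :
    arr.reverse.getD j 0 = arr.getD (arr.length - 1 - j) 0 := by
  rw [List.getD_eq_getElem?_getD, List.getD_eq_getElem?_getD, List.getElem?_reverse hj]

lemma pvNextDom_getD (arr : List Int) (beats : Int → Int → Bool) (htr : pvTrans beats)
    (i : Nat) (hi : i < arr.length) :
    (pvNextDom arr beats).getD i 0
      = (if 0 ≤ pvResVal arr.reverse beats (arr.length - 1 - i)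
         then (arr.length : Int) - 1 - pvResVal arr.reverse beats (arr.length - 1 - i)
         else (arr.length : Int)) := by
  unfold pvNextDom
  simp only
  rw [List.getD_eq_getElem?_getD, List.getElem?_map, List.getElem?_range hi]
  simp only [Option.map_some, Option.getD_some]
  rw [pvPrevDom_getD arr.reverse beats htr (arr.length - 1 - i)
      (by rw [List.length_reverse]; omega)]

lemma pvNextDom_ge_iff (arr : List Int) (beats : Int → Int → Bool)
    (htr : pvTrans beats) (hm : pvMono beats) (i t : Nat)
    (hi : i < arr.length) (hit : i < t) (htn : t ≤ arr.length) :
    ((t : Int) ≤ (pvNextDom arr beats).getD i 0)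
      ↔ ∀ j, i < j → j < t → beats (arr.getD j 0) (arr.getD i 0) = false := by
  set n := arr.length with hn
  rw [pvNextDom_getD arr beats htr i hi]
  have hrl : arr.reverse.length = n := List.length_reverse
  have hprev := pvResVal_lt_iff arr.reverse beats hm (n - 1 - i) (n - t) (by omega)
  have hneg := pvNeg_one_le_resVal arr.reverse beats (n - 1 - i)
  set p := pvResVal arr.reverse beats (n - 1 - i) with hp
  have hcast : ((n - t : Nat) : Int) = (n : Int) - (t : Int) := by omega
  have hlhs : ((t : Int) ≤ (if 0 ≤ p then (n : Int) - 1 - p else (n : Int))) ↔ p < ((n - t : Nat) : Int) := by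
    rw [hcast]
    split_ifs with h0 <;> omega
  rw [hlhs, hprev]
  have hrevi : arr.reverse.getD (n - 1 - i) 0 = arr.getD i 0 := by
    rw [pvGetD_reverse arr (n - 1 - i) (by omega)]
    congr 1
    omega
  constructor
  · intro hall j hij hjt
    have := hall (n - 1 - j) (by omega) (by omega)
    rw [pvGetD_reverse arr (n - 1 - j) (by omega), hrevi] at this
    have hjj : n - 1 - (n - 1 - j) = j := by omega
    rwa [hjj] at this
  · intro hall j' htj' hj'
    rw [pvGetD_reverse arr j' (by omega), hrevi]
    exact hall (n - 1 - j') (by omega) (by omega)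

-- membership in the python slice xs[a:b] (0 ≤ a ≤ b) as an index set
lemma pvMem_drop_take (arr : List Int) (a b : Nat) (hab : a ≤ b) (x : Int) :
    x ∈ (arr.drop a).take (b - a)
      ↔ ∃ j, a ≤ j ∧ j < min b arr.length ∧ x = arr.getD j 0 := by
  rw [List.mem_iff_getElem]
  constructor
  · rintro ⟨k, hk, hval⟩
    have hk' : k < b - a ∧ k < arr.length - a := by
      have := hk
      simp only [List.length_take, List.length_drop] at this
      omega
    refine ⟨a + k, by omega, by omega, ?_⟩
    rw [List.getElem_take, List.getElem_drop] at hval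
    rw [List.getD_eq_getElem?_getD, List.getElem?_eq_getElem (by omega), hval]
    rfl
  · rintro ⟨j, haj, hjb, hval⟩
    refine ⟨j - a, ?_, ?_⟩
    · simp only [List.length_take, List.length_drop]; omega
    · rw [List.getElem_take, List.getElem_drop]
      rw [hval, List.getD_eq_getElem?_getD, List.getElem?_eq_getElem (by omega)]
      congr 2
      omega

lemma pvCond_max (arr : List Int) (a b iN : Nat) (hai : a ≤ iN) (hib : iN < b)
    (hin : iN < arr.length) :
    (arr.getD iN 0 = (PySem.List.max? ((arr.drop a).take (b - a)) (fun x => x)).getD 0)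
      ↔ ∀ j, a ≤ j → j < min b arr.length → arr.getD j 0 ≤ arr.getD iN 0 := by
  have hself : arr.getD iN 0 ∈ (arr.drop a).take (b - a) :=
    (pvMem_drop_take arr a b (by omega) _).mpr ⟨iN, hai, by omega, rfl⟩
  have hne : (arr.drop a).take (b - a) ≠ [] := List.ne_nil_of_mem hself
  rcases hmax : PySem.List.max? ((arr.drop a).take (b - a)) (fun x => x) with _ | m
  · exact absurd hmax (by rw [PySem.List.max?_eq_none_iff]; exact hne)
  · simp only [Option.getD_some]
    constructor
    · intro heq j haj hjb
      have hj : arr.getD j 0 ∈ (arr.drop a).take (b - a) :=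
        (pvMem_drop_take arr a b (by omega) _).mpr ⟨j, haj, hjb, rfl⟩
      have := PySem.List.max?_isMax hmax _ hj
      rw [heq]
      simpa using this
    · intro hall
      have hmm := PySem.List.max?_mem hmax
      rcases (pvMem_drop_take arr a b (by omega) _).mp hmm with ⟨j, haj, hjb, hval⟩
      have h1 : m ≤ arr.getD iN 0 := by rw [hval]; exact hall j haj hjb
      have h2 := PySem.List.max?_isMax hmax _ hself
      omega

lemma pvCond_min (arr : List Int) (a b iN : Nat) (hai : a ≤ iN) (hib : iN < b)
    (hin : iN < arr.length) :
    (arr.getD iN 0 = (PySem.List.min? ((arr.drop a).take (b - a)) (fun x => x)).getD 0)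
      ↔ ∀ j, a ≤ j → j < min b arr.length → arr.getD iN 0 ≤ arr.getD j 0 := by
  have hself : arr.getD iN 0 ∈ (arr.drop a).take (b - a) :=
    (pvMem_drop_take arr a b (by omega) _).mpr ⟨iN, hai, by omega, rfl⟩
  have hne : (arr.drop a).take (b - a) ≠ [] := List.ne_nil_of_mem hself
  rcases hmin : PySem.List.min? ((arr.drop a).take (b - a)) (fun x => x) with _ | m
  · exact absurd hmin (by rw [PySem.List.min?_eq_none_iff]; exact hne)
  · simp only [Option.getD_some]
    constructor
    · intro heq j haj hjb
      have hj : arr.getD j 0 ∈ (arr.drop a).take (b - a) :=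
        (pvMem_drop_take arr a b (by omega) _).mpr ⟨j, haj, hjb, rfl⟩
      have := PySem.List.min?_isMin hmin _ hj
      rw [heq]
      simpa using this
    · intro hall
      have hmm := PySem.List.min?_mem hmin
      rcases (pvMem_drop_take arr a b (by omega) _).mp hmm with ⟨j, haj, hjb, hval⟩
      have h1 : arr.getD iN 0 ≤ m := by rw [hval]; exact hall j haj hjb
      have h2 := PySem.List.min?_isMin hmin _ hself
      omega

lemma pvGtTrans : pvTrans (fun a b : Int => a > b) := by
  intro a b c h1 h2
  simp only [decide_eq_true_eq] at h1 h2 ⊢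
  omega

lemma pvGtMono : pvMono (fun a b : Int => a > b) := by
  intro a b c h1 h2
  simp only [decide_eq_true_eq] at h1 ⊢
  simp only [decide_eq_false_iff_not] at h2
  omega

lemma pvLtTrans : pvTrans (fun a b : Int => a < b) := by
  intro a b c h1 h2
  simp only [decide_eq_true_eq] at h1 h2 ⊢
  omega

lemma pvLtMono : pvMono (fun a b : Int => a < b) := by
  intro a b c h1 h2
  simp only [decide_eq_true_eq] at h1 ⊢
  simp only [decide_eq_false_iff_not] at h2
  omega

-- ===== VERDICT (by name: the statement is the Claim_ definition above) =====
theorem get_major_swings_spec : Claim_equal_get_major_swings := by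
  intro highs lows lookback _ hpre
  obtain ⟨hlb, hdisj⟩ := hpre
  obtain ⟨lbN, rfl⟩ := Int.eq_ofNat_of_zero_le hlb
  unfold Spec_get_major_swings get_major_swings get_major_swings_alt
  dsimp only
  refine PySem.List.foldl_congr_mem _ _ _ _ ?_
  intro st i hi
  rw [PySem.List.mem_pyRange_one] at hi
  obtain ⟨hi1, hi2⟩ := hi
  obtain ⟨iN, rfl⟩ := Int.eq_ofNat_of_zero_le (le_trans (by positivity) hi1)
  have hlbi : lbN ≤ iN := by exact_mod_cast hi1
  have hiH : iN + lbN + 1 ≤ highs.length := by omega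
  have hiL : iN + lbN + 1 ≤ lows.length := by
    rcases hdisj with h | h <;> omega
  -- the high-swing conditions agree
  have hvA : (PySem.List.pyGet? highs ((iN : Nat) : Int)).getD 0 = highs.getD iN 0 := by
    rw [PySem.List.pyGet?_natCast, List.getD_eq_getElem?_getD]
  have ecastA : (((iN : Nat) : Int) - ((lbN : Nat) : Int)) = ((iN - lbN : Nat) : Int) := by omega
  have ecastB : (((iN : Nat) : Int) + ((lbN : Nat) : Int) + 1) = ((iN + lbN + 1 : Nat) : Int) := by
    push_cast; ring
  have hPrevH : (((iN : Nat) : Int) - PySem.List.pyGetD (pvPrevDom highs (fun a b => a > b)) ((iN : Nat) : Int) 0 > ((lbN : Nat) : Int))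
      ↔ ∀ j, iN - lbN ≤ j → j < iN → highs.getD j 0 ≤ highs.getD iN 0 := by
    rw [PySem.List.pyGetD_natCast, pvPrevDom_getD highs _ pvGtTrans iN (by omega)]
    have harith : (((iN : Nat) : Int) - pvResVal highs (fun a b => a > b) iN > ((lbN : Nat) : Int))
        ↔ pvResVal highs (fun a b => a > b) iN < ((iN - lbN : Nat) : Int) := by
      constructor <;> intro <;> omega
    rw [harith, pvResVal_lt_iff highs _ pvGtMono iN (iN - lbN) (by omega)]
    constructor <;> intro h j h1 h2
    · have := h j h1 h2
      simp only [decide_eq_false_iff_not] at this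
      omega
    · simp only [decide_eq_false_iff_not]
      have := h j h1 h2
      omega
  have hNextH : (PySem.List.pyGetD (pvNextDom highs (fun a b => a > b)) ((iN : Nat) : Int) 0 - ((iN : Nat) : Int) > ((lbN : Nat) : Int))
      ↔ ∀ j, iN < j → j < iN + lbN + 1 → highs.getD j 0 ≤ highs.getD iN 0 := by
    rw [PySem.List.pyGetD_natCast]
    have harith : ((pvNextDom highs (fun a b => a > b)).getD iN 0 - ((iN : Nat) : Int) > ((lbN : Nat) : Int))
        ↔ (((iN + lbN + 1 : Nat) : Int) ≤ (pvNextDom highs (fun a b => a > b)).getD iN 0) := by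
      constructor <;> intro <;> omega
    rw [harith, pvNextDom_ge_iff highs _ pvGtTrans pvGtMono iN (iN + lbN + 1) (by omega) (by omega) (by omega)]
    constructor <;> intro h j h1 h2
    · have := h j h1 h2
      simp only [decide_eq_false_iff_not] at this
      omega
    · simp only [decide_eq_false_iff_not]
      have := h j h1 h2
      omega
  have hHigh : ((PySem.List.pyGet? highs ((iN : Nat) : Int)).getD 0
        = (PySem.List.max? (PySem.List.slice highs (some (((iN : Nat) : Int) - ((lbN : Nat) : Int))) (some (((iN : Nat) : Int) + ((lbN : Nat) : Int) + 1))) (fun x => x)).getD 0)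
      ↔ (((iN : Nat) : Int) - PySem.List.pyGetD (pvPrevDom highs (fun a b => a > b)) ((iN : Nat) : Int) 0 > ((lbN : Nat) : Int)
          ∧ PySem.List.pyGetD (pvNextDom highs (fun a b => a > b)) ((iN : Nat) : Int) 0 - ((iN : Nat) : Int) > ((lbN : Nat) : Int)) := by
    rw [hvA, ecastA, ecastB, PySem.List.slice_natCast]
    rw [pvCond_max highs (iN - lbN) (iN + lbN + 1) iN (by omega) (by omega) (by omega)]
    rw [hPrevH, hNextH]
    constructor
    · intro h
      constructor
      · intro j h1 h2; exact h j h1 (by omega)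
      · intro j h1 h2; exact h j (by omega) (by omega)
    · rintro ⟨h1, h2⟩ j hj1 hj2
      by_cases hcase : j < iN
      · exact h1 j hj1 hcase
      · by_cases hcase2 : j = iN
        · subst hcase2; exact le_rfl
        · exact h2 j (by omega) (by omega)
  -- the low-swing conditions agree
  have hvL : (PySem.List.pyGet? lows ((iN : Nat) : Int)).getD 0 = lows.getD iN 0 := by
    rw [PySem.List.pyGet?_natCast, List.getD_eq_getElem?_getD]
  have hPrevL : (((iN : Nat) : Int) - PySem.List.pyGetD (pvPrevDom lows (fun a b => a < b)) ((iN : Nat) : Int) 0 > ((lbN : Nat) : Int))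
      ↔ ∀ j, iN - lbN ≤ j → j < iN → lows.getD iN 0 ≤ lows.getD j 0 := by
    rw [PySem.List.pyGetD_natCast, pvPrevDom_getD lows _ pvLtTrans iN (by omega)]
    have harith : (((iN : Nat) : Int) - pvResVal lows (fun a b => a < b) iN > ((lbN : Nat) : Int))
        ↔ pvResVal lows (fun a b => a < b) iN < ((iN - lbN : Nat) : Int) := by
      constructor <;> intro <;> omega
    rw [harith, pvResVal_lt_iff lows _ pvLtMono iN (iN - lbN) (by omega)]
    constructor <;> intro h j h1 h2
    · have := h j h1 h2
      simp only [decide_eq_false_iff_not] at this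
      omega
    · simp only [decide_eq_false_iff_not]
      have := h j h1 h2
      omega
  have hNextL : (PySem.List.pyGetD (pvNextDom lows (fun a b => a < b)) ((iN : Nat) : Int) 0 - ((iN : Nat) : Int) > ((lbN : Nat) : Int))
      ↔ ∀ j, iN < j → j < iN + lbN + 1 → lows.getD iN 0 ≤ lows.getD j 0 := by
    rw [PySem.List.pyGetD_natCast]
    have harith : ((pvNextDom lows (fun a b => a < b)).getD iN 0 - ((iN : Nat) : Int) > ((lbN : Nat) : Int))
        ↔ (((iN + lbN + 1 : Nat) : Int) ≤ (pvNextDom lows (fun a b => a < b)).getD iN 0) := by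
      constructor <;> intro <;> omega
    rw [harith, pvNextDom_ge_iff lows _ pvLtTrans pvLtMono iN (iN + lbN + 1) (by omega) (by omega) (by omega)]
    constructor <;> intro h j h1 h2
    · have := h j h1 h2
      simp only [decide_eq_false_iff_not] at this
      omega
    · simp only [decide_eq_false_iff_not]
      have := h j h1 h2
      omega
  have hminL : min (iN + lbN + 1) lows.length = iN + lbN + 1 := by omega
  have hLow : ((PySem.List.pyGet? lows ((iN : Nat) : Int)).getD 0
        = (PySem.List.min? (PySem.List.slice lows (some (((iN : Nat) : Int) - ((lbN : Nat) : Int))) (some (((iN : Nat) : Int) + ((lbN : Nat) : Int) + 1))) (fun x => x)).getD 0)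
      ↔ (((iN : Nat) : Int) - PySem.List.pyGetD (pvPrevDom lows (fun a b => a < b)) ((iN : Nat) : Int) 0 > ((lbN : Nat) : Int)
          ∧ PySem.List.pyGetD (pvNextDom lows (fun a b => a < b)) ((iN : Nat) : Int) 0 - ((iN : Nat) : Int) > ((lbN : Nat) : Int)) := by
    rw [hvL, ecastA, ecastB, PySem.List.slice_natCast]
    rw [pvCond_min lows (iN - lbN) (iN + lbN + 1) iN (by omega) (by omega) (by omega)]
    rw [hminL, hPrevL, hNextL]
    constructor
    · intro h
      constructor
      · intro j h1 h2; exact h j h1 (by omega)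
      · intro j h1 h2; exact h j (by omega) (by omega)
    · rintro ⟨h1, h2⟩ j hj1 hj2
      by_cases hcase : j < iN
      · exact h1 j hj1 hcase
      · by_cases hcase2 : j = iN
        · subst hcase2; exact le_rfl
        · exact h2 j (by omega) (by omega)
  simp only [hHigh, hLow]
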